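-- pv_equiv track=rewrite | github.com/ajit1979/spg-tools | browser-cli/extractor.py | extract_from_cookies
-- ===== SOURCE A (Python) =====
-- def extract_from_cookies(cookies):
--     """
--     Extract authentication tokens from cookies list.
--
--     Args:
--         cookies: List of cookie dicts with 'name' and 'value' keys
--
--     Returns:
--         Dict with extracted tokens: {jsessionid, token, x-signavio-id}
--         Note: token and x-signavio-id have the same value
--     """
--     result = {
--         'jsessionid': None,
--         'token': None,
--         'x-signavio-id': None
--     }
--
--     if not cookies:
--         return result
--
--     for cookie in cookies:
--         name = cookie.get('name', '')
--         value = cookie.get('value', '')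
--
--         if name == 'JSESSIONID':
--             result['jsessionid'] = value
--         elif name == 'token':
--             result['token'] = value
--             result['x-signavio-id'] = value  # Same value as token
--
--     return result
-- ===== SOURCE B (Python) =====
-- def extract_from_cookies(cookies):
--     """Reverse-scan version: each slot is the value of the LAST cookie with
--     the wanted name, found by an early-exit scan from the end (no dict is
--     mutated while looping)."""
--     def last_value(key):
--         for cookie in reversed(cookies):
--             if cookie.get('name', '') == key:
--                 return cookie.get('value', '')
--         return None
--     token = last_value('token')
--     return {
--         'jsessionid': last_value('JSESSIONID'),
--         'token': token,
--         'x-signavio-id': token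
--     }
-- ===== Notes on version B (the rewrite author's own statement) =====
-- stated objective: simpler
-- what changed: Replaces A's forward scan that mutates a result dict branch-by-branch with two early-exit reverse scans (last match wins automatically), building the result dict once as a literal.
import Mathlib
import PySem

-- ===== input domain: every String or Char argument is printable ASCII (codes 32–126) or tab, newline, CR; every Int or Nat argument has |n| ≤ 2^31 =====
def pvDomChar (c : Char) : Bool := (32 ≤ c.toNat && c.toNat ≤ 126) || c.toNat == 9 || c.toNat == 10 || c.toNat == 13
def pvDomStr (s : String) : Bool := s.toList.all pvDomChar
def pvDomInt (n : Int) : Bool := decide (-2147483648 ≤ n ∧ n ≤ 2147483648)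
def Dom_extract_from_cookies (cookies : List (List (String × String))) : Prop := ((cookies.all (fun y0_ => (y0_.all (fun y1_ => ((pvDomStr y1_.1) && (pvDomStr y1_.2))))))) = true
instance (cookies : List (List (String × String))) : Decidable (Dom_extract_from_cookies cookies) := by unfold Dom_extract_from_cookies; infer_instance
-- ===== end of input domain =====

-- B replaces A's forward result-dict mutation by early-exit reverse scans (last match wins); simpler decomposition, same cost.


-- ===== PORT A =====
def extract_from_cookies (cookies : List (List (String × String))) : List (String × Option String) :=
  let result : PySem.Dict String (Option String) :=
    PySem.Dict.ofList [("jsessionid", none), ("token", none), ("x-signavio-id", none)]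
  if cookies.isEmpty then result.items
  else
    (cookies.foldl (fun r cookie =>
      let name := (PySem.Dict.mk cookie).getD "name" ""
      let value := (PySem.Dict.mk cookie).getD "value" ""
      if name == "JSESSIONID" then r.insert "jsessionid" (some value)
      else if name == "token" then
        (r.insert "token" (some value)).insert "x-signavio-id" (some value)
      else r) result).items

-- ===== PORT B =====
-- B's inner `for cookie in reversed(cookies): … return …` loop, with early exit.
def pvLastValue (key : String) : List (List (String × String)) → Option String
  | [] => none
  | cookie :: rest =>
      if (PySem.Dict.mk cookie).getD "name" "" == key
      then some ((PySem.Dict.mk cookie).getD "value" "")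
      else pvLastValue key rest

def extract_from_cookies_alt (cookies : List (List (String × String))) : List (String × Option String) :=
  let token := pvLastValue "token" cookies.reverse
  [("jsessionid", pvLastValue "JSESSIONID" cookies.reverse),
   ("token", token),
   ("x-signavio-id", token)]

-- ===== PRECONDITION & SPEC =====
def Spec_extract_from_cookies (cookies : List (List (String × String))) (out : List (String × Option String)) : Prop := out = extract_from_cookies_alt cookies
instance (cookies : List (List (String × String))) (out : List (String × Option String)) : Decidable (Spec_extract_from_cookies cookies out) := by unfold Spec_extract_from_cookies; infer_instance

-- ===== CLAIM =====
def Claim_equal_extract_from_cookies : Prop := ∀ (cookies : List (List (String × String))), Dom_extract_from_cookies cookies → Spec_extract_from_cookies cookies (extract_from_cookies cookies)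

-- ===== LEMMAS AND PROOFS =====

def pvName (c : List (String × String)) : String := (PySem.Dict.mk c).getD "name" ""
def pvValue (c : List (String × String)) : String := (PySem.Dict.mk c).getD "value" ""

/-- Last value among `cs` whose name is `key`, falling back to `init` — how A's loop updates a slot. -/
def pvUpd (key : String) (cs : List (List (String × String))) (init : Option String) : Option String :=
  cs.foldl (fun acc c => if pvName c == key then some (pvValue c) else acc) init

lemma pvUpd_cons (key : String) (c : List (String × String)) (cs : List (List (String × String)))
    (init : Option String) :
    pvUpd key (c :: cs) init = pvUpd key cs (if pvName c == key then some (pvValue c) else init) := rfl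

lemma pvLastValue_append (key : String) (xs ys : List (List (String × String))) :
    pvLastValue key (xs ++ ys)
      = match pvLastValue key xs with
        | some v => some v
        | none => pvLastValue key ys := by
  induction xs with
  | nil => simp [pvLastValue]
  | cons c xs ih =>
    simp only [List.cons_append, pvLastValue, ih]
    split <;> rfl

/-- A's forward fold equals B's early-exit reverse scan. -/
lemma pvUpd_eq_lastValue (key : String) (cs : List (List (String × String))) (init : Option String) :
    pvUpd key cs init
      = match pvLastValue key cs.reverse with
        | some v => some v
        | none => init := by
  induction cs generalizing init with
  | nil => rfl
  | cons c cs ih =>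
    rw [pvUpd_cons, ih, List.reverse_cons, pvLastValue_append]
    cases h : pvLastValue key cs.reverse
    · simp only [pvLastValue, pvName, pvValue]
      split <;> rfl
    · simp

lemma ins_j (j t x v : Option String) :
    (PySem.Dict.mk [("jsessionid", j), ("token", t), ("x-signavio-id", x)]).insert "jsessionid" v
    = PySem.Dict.mk [("jsessionid", v), ("token", t), ("x-signavio-id", x)] := by
  apply PySem.Dict.ext
  simp [PySem.Dict.items_insert]

lemma ins_t (j t x v : Option String) :
    (PySem.Dict.mk [("jsessionid", j), ("token", t), ("x-signavio-id", x)]).insert "token" v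
    = PySem.Dict.mk [("jsessionid", j), ("token", v), ("x-signavio-id", x)] := by
  apply PySem.Dict.ext
  simp [PySem.Dict.items_insert]

lemma ins_x (j t x v : Option String) :
    (PySem.Dict.mk [("jsessionid", j), ("token", t), ("x-signavio-id", x)]).insert "x-signavio-id" v
    = PySem.Dict.mk [("jsessionid", j), ("token", t), ("x-signavio-id", v)] := by
  apply PySem.Dict.ext
  simp [PySem.Dict.items_insert]

/-- A's loop keeps the three-slot dict in shape, with `token` and `x-signavio-id` in lockstep. -/
lemma a_loop (cs : List (List (String × String))) (j t : Option String) :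
    cs.foldl (fun r cookie =>
      if pvName cookie == "JSESSIONID" then r.insert "jsessionid" (some (pvValue cookie))
      else if pvName cookie == "token" then
        (r.insert "token" (some (pvValue cookie))).insert "x-signavio-id" (some (pvValue cookie))
      else r)
      (PySem.Dict.mk [("jsessionid", j), ("token", t), ("x-signavio-id", t)])
    = PySem.Dict.mk [("jsessionid", pvUpd "JSESSIONID" cs j),
        ("token", pvUpd "token" cs t), ("x-signavio-id", pvUpd "token" cs t)] := by
  induction cs generalizing j t with
  | nil => rfl
  | cons c cs ih =>
    rw [List.foldl_cons, pvUpd_cons, pvUpd_cons, ← ih]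
    congr 1
    by_cases hJ : pvName c = "JSESSIONID"
    · have hT : ¬ (pvName c = "token") := by rw [hJ]; decide
      simp [hJ, ins_j]
    · by_cases hT : pvName c = "token"
      · simp [hT, ins_t, ins_x]
      · simp [hJ, hT]

theorem extract_from_cookies_spec : Claim_equal_extract_from_cookies := by
  intro cookies _
  unfold Spec_extract_from_cookies extract_from_cookies extract_from_cookies_alt
  have hn : ∀ c : List (String × String), (PySem.Dict.mk c).getD "name" "" = pvName c := fun _ => rfl
  have hv : ∀ c : List (String × String), (PySem.Dict.mk c).getD "value" "" = pvValue c := fun _ => rfl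
  have hres : PySem.Dict.ofList [("jsessionid", (none : Option String)), ("token", none), ("x-signavio-id", none)]
      = PySem.Dict.mk [("jsessionid", none), ("token", none), ("x-signavio-id", none)] := by decide
  have hu : ∀ key, pvUpd key cookies none = pvLastValue key cookies.reverse := by
    intro key
    rw [pvUpd_eq_lastValue]
    cases pvLastValue key cookies.reverse <;> rfl
  cases cookies with
  | nil => rfl
  | cons c cs =>
    simp only [hn, hv, hres, List.isEmpty_cons, Bool.false_eq_true, if_false, a_loop, ← hu]
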